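-- pv_equiv track=rewrite | github.com/arunjohn-git/llms-txt-generator | app.py | strip_filler_opener
-- ===== SOURCE A (Python) =====
-- FILLER_STARTERS = [
--     "this page ", "the page ", "this guide ", "this tool ", "this api ",
--     "this document ", "this article ", "this section ",
--     "a quick overview", "an overview of", "a guide to", "a guide for",
--     "a list of", "a collection of", "detailed information",
--     "users to ", "users the ", "covers ",
-- ]
--
-- def strip_filler_opener(desc):
--     d     = desc.strip()
--     lower = d.lower()
--     for starter in FILLER_STARTERS:
--         if lower.startswith(starter):
--             remainder = d[len(starter):].strip()
--             if remainder:
--                 return remainder[0].upper() + remainder[1:]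
--     return d
-- ===== SOURCE B (Python) =====
-- FILLER_STARTERS = [
--     "this page ", "the page ", "this guide ", "this tool ", "this api ",
--     "this document ", "this article ", "this section ",
--     "a quick overview", "an overview of", "a guide to", "a guide for",
--     "a list of", "a collection of", "detailed information",
--     "users to ", "users the ", "covers ",
-- ]
--
-- def _locate(lower, cands, i):
--     """Trie-style parallel scan: walk the description one character at a time,
--     narrowing the set of still-viable starters; a starter fully consumed at
--     depth i is the match (unique, since no starter is a prefix of another)."""
--     if not cands:
--         return None
--     for s in cands:
--         if len(s) == i:
--             return i
--     if not lower:
--         return None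
--     c = lower[0]
--     return _locate(lower[1:], [s for s in cands if s[i] == c], i + 1)
--
-- def strip_filler_opener(desc):
--     d = desc.strip()
--     n = _locate(d.lower(), FILLER_STARTERS, 0)
--     if n is not None:
--         rem = d[n:].strip()
--         if rem:
--             return rem[0].upper() + rem[1:]
--     return d
-- ===== Notes on version B (the rewrite author's own statement) =====
-- stated objective: alternative
-- what changed: Replaces A's per-starter startswith scan (18 full substring comparisons) by a trie-style parallel scan: the description is walked one character at a time while a shrinking list of still-viable starters is maintained, and a starter fully consumed at the current depth is the match.
import Mathlib
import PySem

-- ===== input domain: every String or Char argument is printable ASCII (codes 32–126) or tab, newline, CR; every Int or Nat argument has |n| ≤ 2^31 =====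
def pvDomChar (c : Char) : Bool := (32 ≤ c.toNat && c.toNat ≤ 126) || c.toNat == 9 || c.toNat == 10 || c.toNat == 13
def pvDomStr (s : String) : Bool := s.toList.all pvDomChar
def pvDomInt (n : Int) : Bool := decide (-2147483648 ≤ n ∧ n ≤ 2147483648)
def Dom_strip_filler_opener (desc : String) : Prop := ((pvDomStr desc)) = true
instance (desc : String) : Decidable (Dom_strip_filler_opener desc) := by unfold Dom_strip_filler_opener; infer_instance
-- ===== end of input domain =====

-- B replaces A's per-starter startswith loop by a trie-style parallel scan that walks
-- the description character by character, narrowing a candidate list; objective: alternative.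

-- ===== PORT A =====
def FILLER_STARTERS : List String := [
  "this page ", "the page ", "this guide ", "this tool ", "this api ",
  "this document ", "this article ", "this section ",
  "a quick overview", "an overview of", "a guide to", "a guide for",
  "a list of", "a collection of", "detailed information",
  "users to ", "users the ", "covers "]

-- the 'for starter in FILLER_STARTERS' loop of A (early return = stop recursing)
def stripALoop (d lo : List Char) : List (List Char) → List Char
  | [] => d
  | s :: rest =>
    if PySem.Chars.startswith lo s then
      let r := PySem.Chars.strip (PySem.List.slice d (some (s.length : Int)) none)
      if r ≠ [] then
        -- remainder[0].upper() + remainder[1:]  (pyGet? cannot be none here: r ≠ [])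
        match PySem.List.pyGet? r 0 with
        | some c => PySem.Chars.upperChar c :: PySem.List.slice r (some 1) none
        | none => stripALoop d lo rest
      else stripALoop d lo rest
    else stripALoop d lo rest

def strip_filler_opener (desc : String) : String :=
  let d := PySem.Chars.strip desc.toList
  let lo := PySem.Chars.lower d
  String.ofList (stripALoop d lo (FILLER_STARTERS.map String.toList))

-- ===== PORT B =====  (Source B re-declares the same FILLER_STARTERS constant; the Lean port shares it)
-- _locate(lower, cands, i): recursion consumes 'lower' one character at a time
-- ('lower[1:]' in Source B = the structural tail here), keeping depth i and the
-- still-viable candidates; a candidate of length i has been fully consumed.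
def bLocate (lower : List Char) (cands : List (List Char)) (i : Nat) : Option Nat :=
  if cands.isEmpty then none
  else if cands.any (fun s => s.length == i) then some i
  else
    match lower with
    | [] => none
    | c :: rest => bLocate rest (cands.filter (fun s => s[i]? == some c)) (i + 1)

def strip_filler_opener_alt (desc : String) : String :=
  let d := PySem.Chars.strip desc.toList
  String.ofList <|
    match bLocate (PySem.Chars.lower d) (FILLER_STARTERS.map String.toList) 0 with
    | some n =>
      let rem := PySem.Chars.strip (PySem.List.slice d (some (n : Int)) none)
      if rem ≠ [] then
        match PySem.List.pyGet? rem 0 with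
        | some c => PySem.Chars.upperChar c :: PySem.List.slice rem (some 1) none
        | none => d
      else d
    | none => d

-- ===== PRECONDITION & SPEC =====
def Spec_strip_filler_opener (desc : String) (out : String) : Prop := out = strip_filler_opener_alt desc
instance (desc : String) (out : String) : Decidable (Spec_strip_filler_opener desc out) := by unfold Spec_strip_filler_opener; infer_instance

-- ===== CLAIM (what is proved, stated in full; the proofs are below) =====
def Claim_equal_strip_filler_opener : Prop := ∀ (desc : String), Dom_strip_filler_opener desc → Spec_strip_filler_opener desc (strip_filler_opener desc)

-- ===== LEMMAS AND PROOFS =====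

-- the starters as char lists (proof-side abbreviation)
def pvSL : List (List Char) := FILLER_STARTERS.map String.toList

-- the common tail: what either program returns once the (unique) matching
-- starter, of length n, has been located
def pvPost (d : List Char) (n : Nat) : List Char :=
  let r := PySem.Chars.strip (PySem.List.slice d (some (n : Int)) none)
  if r ≠ [] then
    match PySem.List.pyGet? r 0 with
    | some c => PySem.Chars.upperChar c :: PySem.List.slice r (some 1) none
    | none => d
  else d

-- no starter is a proper prefix of another
lemma pvNoNest : ∀ s ∈ pvSL, ∀ t ∈ pvSL, s <+: t → s = t := by decide

lemma pvNodup : pvSL.Nodup := by decide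

-- at most one starter can be a prefix of a given string
lemma pvUniq (lo : List Char) :
    ∀ s ∈ pvSL, ∀ t ∈ pvSL, s <+: lo → t <+: lo → s = t := by
  intro s hs t ht hsl htl
  rcases List.prefix_or_prefix_of_prefix hsl htl with h | h
  · exact pvNoNest s hs t ht h
  · exact (pvNoNest t ht s hs h).symm

lemma aLoop_none (d lo : List Char) :
    ∀ l, (∀ s ∈ l, ¬ (s <+: lo)) → stripALoop d lo l = d := by
  intro l
  induction l with
  | nil => intro _; rfl
  | cons s rest ih =>
    intro h
    have hs : PySem.Chars.startswith lo s = false := by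
      rcases Bool.eq_false_or_eq_true (PySem.Chars.startswith lo s) with ht | hf
      · exact absurd ((PySem.Chars.startswith_iff lo s).mp ht) (h s (by simp))
      · exact hf
    simp only [stripALoop, hs, Bool.false_eq_true, if_false]
    exact ih (fun t ht => h t (by simp [ht]))

lemma aLoop_found (d lo s₀ : List Char) (hp : s₀ <+: lo) :
    ∀ l, l.Nodup → (∀ s ∈ l, ∀ t ∈ l, s <+: lo → t <+: lo → s = t) → s₀ ∈ l →
      stripALoop d lo l = pvPost d s₀.length := by
  intro l
  induction l with
  | nil => intro _ _ h; exact absurd h (List.not_mem_nil)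
  | cons s rest ih =>
    intro hnd hU hmem
    rcases Bool.eq_false_or_eq_true (PySem.Chars.startswith lo s) with ht | hf
    case inr =>
      -- head does not match; s₀ is in the tail
      have hne : s₀ ≠ s := by
        intro he
        rw [he] at hp
        rw [(PySem.Chars.startswith_iff lo s).mpr hp] at hf
        simp at hf
      have hmem' : s₀ ∈ rest := by
        rcases List.mem_cons.mp hmem with he | h
        · exact absurd he hne
        · exact h
      simp only [stripALoop, hf, Bool.false_eq_true, if_false]
      exact ih (List.Nodup.of_cons hnd)
        (fun a ha b hb => hU a (by simp [ha]) b (by simp [hb])) hmem'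
    case inl =>
      -- head matches: by uniqueness it IS s₀
      have hsp : s <+: lo := (PySem.Chars.startswith_iff lo s).mp ht
      have hse : s = s₀ := hU s (by simp) s₀ hmem hsp hp
      subst hse
      simp only [stripALoop, ht, if_true]
      by_cases hr : PySem.Chars.strip (PySem.List.slice d (some (s.length : Int)) none) = []
      · -- empty remainder: A continues, but nothing in the tail can match
        have hnomatch : ∀ t ∈ rest, ¬ (t <+: lo) := by
          intro t htr htp
          have : t = s := hU t (by simp [htr]) s (by simp) htp hsp
          subst this
          exact (List.nodup_cons.mp hnd).1 htr
        simp only [pvPost, hr, ne_eq, not_true_eq_false, if_false]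
        exact aLoop_none d lo rest hnomatch
      · rcases hx : PySem.Chars.strip (PySem.List.slice d (some (s.length : Int)) none) with _ | ⟨c, cs⟩
        · exact absurd hx hr
        · simp only [pvPost, hx, ne_eq, reduceCtorEq, not_false_eq_true, if_true]
          simp [PySem.List.pyGet?, PySem.List.pyIdx?]

-- B's scan returns none when no candidate (that could still match) is a prefix of lo
lemma bLocate_none (lo : List Char) :
    ∀ rem i cands, rem = lo.drop i →
      (∀ s ∈ cands, s.take i = lo.take i) →
      (∀ s ∈ cands, ¬ (s <+: lo)) →
      bLocate rem cands i = none := by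
  intro rem
  induction rem with
  | nil =>
    intro i cands _ hinv hno
    unfold bLocate
    by_cases he : cands.isEmpty
    · simp [he]
    have hany : cands.any (fun s => s.length == i) = false := by
      rcases Bool.eq_false_or_eq_true (cands.any (fun s => s.length == i)) with ht | hf
      · exfalso
        obtain ⟨s, hs, hl⟩ := List.any_eq_true.mp ht
        have hl' : s.length = i := by simpa using hl
        have : s <+: lo := by
          have : s = lo.take i := by rw [← hinv s hs, List.take_of_length_le (le_of_eq hl')]
          rw [this]; exact List.take_prefix _ _
        exact hno s hs this
      · exact hf
    simp [he, hany]
  | cons c rest ih =>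
    intro i cands hrem hinv hno
    unfold bLocate
    by_cases he : cands.isEmpty
    · simp [he]
    have hany : cands.any (fun s => s.length == i) = false := by
      rcases Bool.eq_false_or_eq_true (cands.any (fun s => s.length == i)) with ht | hf
      · exfalso
        obtain ⟨s, hs, hl⟩ := List.any_eq_true.mp ht
        have hl' : s.length = i := by simpa using hl
        have : s <+: lo := by
          have : s = lo.take i := by rw [← hinv s hs, List.take_of_length_le (le_of_eq hl')]
          rw [this]; exact List.take_prefix _ _
        exact hno s hs this
      · exact hf
    simp only [he, Bool.false_eq_true, if_false, hany]
    have hci : lo[i]? = some c := by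
      rw [← List.head?_drop, ← hrem]; rfl
    apply ih (i + 1)
    · have := congrArg List.tail hrem
      simpa [List.tail_drop] using this
    · intro s hs
      obtain ⟨hs', hflt⟩ := List.mem_filter.mp hs
      have hsi : s[i]? = some c := by simpa using hflt
      have hilt : i < s.length := by
        by_contra h
        rw [List.getElem?_eq_none (by omega)] at hsi
        simp at hsi
      rw [List.take_add_one, List.take_add_one, hinv s hs', hsi, hci]
    · intro s hs
      exact hno s (List.mem_filter.mp hs).1

-- B's scan finds the unique matching starter s₀
lemma bLocate_found (lo s₀ : List Char) (hp : s₀ <+: lo) :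
    ∀ rem i cands, rem = lo.drop i → i ≤ s₀.length → s₀ ∈ cands →
      (∀ s ∈ cands, s.take i = lo.take i) →
      (∀ s ∈ cands, s <+: lo → s = s₀) →
      bLocate rem cands i = some s₀.length := by
  intro rem
  induction rem with
  | nil =>
    intro i cands hrem hile hmem hinv hU
    -- lo exhausted at depth i, so i ≥ lo.length ≥ s₀.length ≥ i, hence length check fires
    have hlo : lo.length ≤ i := by
      have := congrArg List.length hrem
      simp [List.length_drop] at this
      omega
    have hsolen : s₀.length = i := le_antisymm (le_trans hp.length_le hlo) hile
    unfold bLocate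
    have he : cands.isEmpty = false := by
      cases cands with
      | nil => exact absurd hmem (List.not_mem_nil)
      | cons a l => rfl
    have hany : cands.any (fun s => s.length == i) = true :=
      List.any_eq_true.mpr ⟨s₀, hmem, by simp [hsolen]⟩
    simp [he, hany, hsolen]
  | cons c rest ih =>
    intro i cands hrem hile hmem hinv hU
    unfold bLocate
    have he : cands.isEmpty = false := by
      cases cands with
      | nil => exact absurd hmem (List.not_mem_nil)
      | cons a l => rfl
    have hci : lo[i]? = some c := by
      rw [← List.head?_drop, ← hrem]; rfl
    have hilo : i < lo.length := by
      rcases List.getElem?_eq_some_iff.mp hci with ⟨h, _⟩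
      exact h
    rcases Bool.eq_false_or_eq_true (cands.any (fun s => s.length == i)) with ht | hf
    · -- some candidate of length i: it equals s₀, return some i = some s₀.length
      obtain ⟨s, hs, hl⟩ := List.any_eq_true.mp ht
      have hl' : s.length = i := by simpa using hl
      have hsp : s <+: lo := by
        have : s = lo.take i := by rw [← hinv s hs, List.take_of_length_le (le_of_eq hl')]
        rw [this]; exact List.take_prefix _ _
      have : s = s₀ := hU s hs hsp
      simp [he, ht, ← this, hl']
    · -- no full match yet: i < s₀.length, recurse
      have hne : s₀.length ≠ i := by
        intro heq
        have : cands.any (fun s => s.length == i) = true :=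
          List.any_eq_true.mpr ⟨s₀, hmem, by simp [heq]⟩
        rw [this] at hf; exact Bool.noConfusion hf
      have hlt : i < s₀.length := lt_of_le_of_ne hile (Ne.symm hne)
      simp only [he, Bool.false_eq_true, if_false, hf]
      apply ih (i + 1)
      · have := congrArg List.tail hrem
        simpa [List.tail_drop] using this
      · omega
      · -- s₀ survives the filter: s₀[i] = lo[i] = c since s₀ <+: lo
        apply List.mem_filter.mpr
        refine ⟨hmem, ?_⟩
        have hsi : s₀[i]? = some c := by
          obtain ⟨t, ht⟩ := hp
          rw [← List.getElem?_append_left hlt (l₂ := t), ht]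
          exact hci
        simpa using hsi
      · intro s hs
        obtain ⟨hs', hflt⟩ := List.mem_filter.mp hs
        have hsi : s[i]? = some c := by simpa using hflt
        have hilt : i < s.length := by
          by_contra h
          rw [List.getElem?_eq_none (by omega)] at hsi
          simp at hsi
        rw [List.take_add_one, List.take_add_one, hinv s hs', hsi, hci]
      · intro s hs
        exact hU s (List.mem_filter.mp hs).1

lemma pvAlt_eq (d lo : List Char) :
    stripALoop d lo pvSL =
      (match bLocate lo pvSL 0 with
        | some n => pvPost d n
        | none => d) := by
  by_cases h : ∃ s ∈ pvSL, s <+: lo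
  · obtain ⟨s₀, hs₀, hp⟩ := h
    rw [aLoop_found d lo s₀ hp pvSL pvNodup (pvUniq lo) hs₀,
      bLocate_found lo s₀ hp lo 0 pvSL (by simp) (Nat.zero_le _) hs₀
        (by intro s _; simp) (fun s hs hsp => pvUniq lo s hs s₀ hs₀ hsp hp)]
  · push Not at h
    rw [aLoop_none d lo pvSL h,
      bLocate_none lo lo 0 pvSL (by simp) (by intro s _; simp) h]

-- ===== VERDICT (by name: the statement is the Claim_ definition above) =====
theorem strip_filler_opener_spec : Claim_equal_strip_filler_opener := by
  intro desc _
  unfold Spec_strip_filler_opener strip_filler_opener strip_filler_opener_alt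
  have h := pvAlt_eq (PySem.Chars.strip desc.toList)
    (PySem.Chars.lower (PySem.Chars.strip desc.toList))
  simp only []
  rw [show (FILLER_STARTERS.map String.toList) = pvSL from rfl, h]
  rcases bLocate (PySem.Chars.lower (PySem.Chars.strip desc.toList)) pvSL 0 with _ | n
  · rfl
  · rfl
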